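-- pv_equiv track=rewrite | github.com/malcolm-weathers/python_pathrise93_problemsolving | q15_timevalue.py | vals
-- ===== SOURCE A (Python) =====
-- def vals(tv_arr, a, b):
--     least_time = b
--     least_val = -1
--     most_time = a
--     most_val = -1
--     for tv in tv_arr:
--         if tv[0] < least_time and tv[0] >= a:
--             least_time = tv[0]
--             least_val = tv[1]
--         if tv[0] > most_time and tv[0] <= b:
--             most_time = tv[0]
--             most_val = tv[1]
--     return least_val, most_val
-- ===== SOURCE B (Python) =====
-- def vals(tv_arr, a, b):
--     def first_in_range(pairs, lo, hi):
--         # stable sort ascending by time: the first element with time >= lo has the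
--         # minimal time among those >= lo, and is the first such element in input order
--         for t, v in sorted(pairs, key=lambda tv: tv[0]):
--             if t >= lo:
--                 return v if t < hi else -1
--         return -1
--     least = first_in_range(tv_arr, a, b)
--     most = first_in_range([(-t, v) for t, v in tv_arr], -b, -a)
--     return least, most
-- ===== Notes on version B (the rewrite author's own statement) =====
-- stated objective: alternative
-- what changed: Replaces A's single-pass four-variable threshold-tracking loop with a sort-based selection: stably sort by time and take the first element with time >= lo (checking time < hi), applied once directly for the least and once to the time-negated list for the most; stability reproduces A's first-occurrence tie behaviour.
import Mathlib
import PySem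

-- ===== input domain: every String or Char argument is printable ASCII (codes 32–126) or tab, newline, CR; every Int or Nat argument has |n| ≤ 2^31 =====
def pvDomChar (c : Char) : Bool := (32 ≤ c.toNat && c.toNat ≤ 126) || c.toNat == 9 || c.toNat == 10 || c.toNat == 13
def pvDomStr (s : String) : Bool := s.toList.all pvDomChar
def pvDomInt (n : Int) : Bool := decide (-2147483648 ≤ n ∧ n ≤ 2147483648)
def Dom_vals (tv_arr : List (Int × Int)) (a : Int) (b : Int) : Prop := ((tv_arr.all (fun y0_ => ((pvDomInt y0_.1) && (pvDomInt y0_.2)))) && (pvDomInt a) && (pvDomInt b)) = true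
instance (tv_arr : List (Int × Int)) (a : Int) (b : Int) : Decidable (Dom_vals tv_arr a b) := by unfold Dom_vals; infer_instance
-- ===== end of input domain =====

-- B replaces A's single-pass four-variable threshold loop with a sort-based selection
-- (stable sort by time, then first element with time >= lo), applied to the list
-- itself for the least and to the time-negated list for the most (objective: alternative).

-- ===== PORT A =====
def vals (tv_arr : List (Int × Int)) (a : Int) (b : Int) : Int × Int :=
  -- state (least_time, least_val, most_time, most_val)
  let s := tv_arr.foldl (fun s tv =>
    let s := if tv.1 < s.1 ∧ tv.1 ≥ a then (tv.1, tv.2, s.2.2.1, s.2.2.2) else s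
    let s := if tv.1 > s.2.2.1 ∧ tv.1 ≤ b then (s.1, s.2.1, tv.1, tv.2) else s
    s) (b, -1, a, -1)
  (s.2.1, s.2.2.2)

-- ===== PORT B =====
-- the 'for … return …' loop of Source B's first_in_range over the sorted list
def pvFirstLoop (s : List (Int × Int)) (lo hi : Int) : Int :=
  match s with
  | [] => -1
  | (t, v) :: rest => if lo ≤ t then (if t < hi then v else -1) else pvFirstLoop rest lo hi

def pvFirstInRange (pairs : List (Int × Int)) (lo hi : Int) : Int :=
  pvFirstLoop (PySem.List.sorted pairs (fun tv => tv.1) false) lo hi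

def vals_alt (tv_arr : List (Int × Int)) (a : Int) (b : Int) : Int × Int :=
  let least := pvFirstInRange tv_arr a b
  let most := pvFirstInRange (tv_arr.map (fun tv => (-tv.1, tv.2))) (-b) (-a)
  (least, most)

-- ===== PRECONDITION & SPEC =====
def Spec_vals (tv_arr : List (Int × Int)) (a : Int) (b : Int) (out : Int × Int) : Prop := out = vals_alt tv_arr a b
instance (tv_arr : List (Int × Int)) (a : Int) (b : Int) (out : Int × Int) : Decidable (Spec_vals tv_arr a b out) := by unfold Spec_vals; infer_instance

-- ===== CLAIM (what is proved, stated in full; the proofs are below) =====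
def Claim_equal_vals : Prop := ∀ (tv_arr : List (Int × Int)) (a : Int) (b : Int), Dom_vals tv_arr a b → Spec_vals tv_arr a b (vals tv_arr a b)

-- ===== LEMMAS AND PROOFS =====

-- accumulator steps of a first-extremum scan
def pvMinStep (acc : Option (Int × Int)) (x : Int × Int) : Option (Int × Int) :=
  match acc with
  | none => some x
  | some m => if x.1 < m.1 then some x else some m

def pvMaxStep (acc : Option (Int × Int)) (x : Int × Int) : Option (Int × Int) :=
  match acc with
  | none => some x
  | some m => if m.1 < x.1 then some x else some m

-- A's combined loop, coupled with two guarded option-accumulator loops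
theorem pvFoldA_eq (a b : Int) (xs : List (Int × Int)) (oL oM : Option (Int × Int))
    (hL : ∀ m, oL = some m → a ≤ m.1 ∧ m.1 < b)
    (hM : ∀ m, oM = some m → a < m.1 ∧ m.1 ≤ b) :
    xs.foldl (fun s tv =>
      let s := if tv.1 < s.1 ∧ tv.1 ≥ a then (tv.1, tv.2, s.2.2.1, s.2.2.2) else s
      let s := if tv.1 > s.2.2.1 ∧ tv.1 ≤ b then (s.1, s.2.1, tv.1, tv.2) else s
      s) ((oL.getD (b, -1)).1, (oL.getD (b, -1)).2, (oM.getD (a, -1)).1, (oM.getD (a, -1)).2)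
    = (((xs.foldl (fun acc tv => if a ≤ tv.1 ∧ tv.1 < b then pvMinStep acc tv else acc) oL).getD (b, -1)).1,
       ((xs.foldl (fun acc tv => if a ≤ tv.1 ∧ tv.1 < b then pvMinStep acc tv else acc) oL).getD (b, -1)).2,
       ((xs.foldl (fun acc tv => if a < tv.1 ∧ tv.1 ≤ b then pvMaxStep acc tv else acc) oM).getD (a, -1)).1,
       ((xs.foldl (fun acc tv => if a < tv.1 ∧ tv.1 ≤ b then pvMaxStep acc tv else acc) oM).getD (a, -1)).2) := by
  induction xs generalizing oL oM with
  | nil => rfl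
  | cons x t ih =>
    simp only [List.foldl_cons]
    have hL' : ∀ m, (if a ≤ x.1 ∧ x.1 < b then pvMinStep oL x else oL) = some m → a ≤ m.1 ∧ m.1 < b := by
      intro m hm; split_ifs at hm with h
      · rcases oL with _ | mL
        · simp [pvMinStep] at hm; subst hm; exact ⟨h.1, h.2⟩
        · simp only [pvMinStep] at hm
          split_ifs at hm <;> (cases hm; first | exact ⟨h.1, h.2⟩ | exact hL _ rfl)
      · exact hL _ hm
    have hM' : ∀ m, (if a < x.1 ∧ x.1 ≤ b then pvMaxStep oM x else oM) = some m → a < m.1 ∧ m.1 ≤ b := by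
      intro m hm; split_ifs at hm with h
      · rcases oM with _ | mM
        · simp [pvMaxStep] at hm; subst hm; exact ⟨h.1, h.2⟩
        · simp only [pvMaxStep] at hm
          split_ifs at hm <;> (cases hm; first | exact ⟨h.1, h.2⟩ | exact hM _ rfl)
      · exact hM _ hm
    rw [← ih _ _ hL' hM']
    congr 1
    clear ih
    rcases oL with _ | mL <;> rcases oM with _ | mM <;>
      simp only [pvMinStep, pvMaxStep, Option.getD_some, Option.getD_none]
    · split_ifs <;> (try dsimp only at *) <;> first | rfl | omega
    · have h2 := hM mM rfl
      split_ifs <;> (try dsimp only at *) <;> first | rfl | omega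
    · have h1 := hL mL rfl
      split_ifs <;> (try dsimp only at *) <;> first | rfl | omega
    · have h1 := hL mL rfl
      have h2 := hM mM rfl
      split_ifs <;> (try dsimp only at *) <;> first | rfl | omega

-- find? over an insertBy insertion = one guarded pvMinStep step
theorem pvFind_insertBy (lo : Int) (x : Int × Int) (s : List (Int × Int)) :
    (PySem.List.insertBy (fun p q => decide (p.1 < q.1)) x s).find? (fun p => decide (lo ≤ p.1))
    = if lo ≤ x.1 then pvMinStep (s.find? (fun p => decide (lo ≤ p.1))) x
      else s.find? (fun p => decide (lo ≤ p.1)) := by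
  induction s with
  | nil =>
    simp only [PySem.List.insertBy, List.find?]
    by_cases h : lo ≤ x.1 <;> simp [h, pvMinStep]
  | cons y t ih =>
    simp only [PySem.List.insertBy]
    by_cases hxy : x.1 < y.1
    · simp only [hxy, decide_true, if_true]
      by_cases hx : lo ≤ x.1
      · have hy : lo ≤ y.1 := le_of_lt (lt_of_le_of_lt hx hxy)
        simp [List.find?, hx, hy, pvMinStep, hxy]
      · simp [List.find?, hx]
    · simp only [hxy, decide_false, Bool.false_eq_true, if_false]
      by_cases hy : lo ≤ y.1
      · have hx : lo ≤ x.1 := by omega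
        simp [List.find?, hx, hy, pvMinStep, hxy]
      · simp [List.find?, hy, ih]

-- find? on the stably sorted list = first-minimum option fold over the original list
theorem pvFind_sorted (lo : Int) (xs : List (Int × Int)) :
    (PySem.List.sorted xs (fun tv => tv.1) false).find? (fun p => decide (lo ≤ p.1))
    = xs.foldl (fun acc tv => if lo ≤ tv.1 then pvMinStep acc tv else acc) none := by
  induction xs using List.reverseRecOn with
  | nil => simp [PySem.List.sorted]
  | append_singleton t x ih =>
    rw [PySem.List.sorted_eq_foldl_insertBy, List.foldl_append, List.foldl_append,
        ← PySem.List.sorted_eq_foldl_insertBy]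
    simp only [List.foldl_cons, List.foldl_nil]
    rw [pvFind_insertBy, ih]

-- the loop of first_in_range is a find? followed by the upper-bound check
theorem pvFirstLoop_eq_find (s : List (Int × Int)) (lo hi : Int) :
    pvFirstLoop s lo hi
    = match s.find? (fun p => decide (lo ≤ p.1)) with
      | none => -1
      | some m => if m.1 < hi then m.2 else -1 := by
  induction s with
  | nil => rfl
  | cons y t ih =>
    rcases y with ⟨yt, yv⟩
    by_cases hy : lo ≤ yt <;> simp [pvFirstLoop, List.find?, hy, ih]

-- one-sided min fold, post-checked against hi, equals the two-sided min fold
theorem pvMin_one_sided (lo hi : Int) (xs : List (Int × Int)) (o1 o2 : Option (Int × Int))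
    (hrel : o2 = match o1 with
      | none => none
      | some m => if m.1 < hi then some m else none) :
    (match xs.foldl (fun acc tv => if lo ≤ tv.1 then pvMinStep acc tv else acc) o1 with
      | none => (-1 : Int)
      | some m => if m.1 < hi then m.2 else -1)
    = (match xs.foldl (fun acc tv => if lo ≤ tv.1 ∧ tv.1 < hi then pvMinStep acc tv else acc) o2 with
      | none => (-1 : Int)
      | some m => m.2) := by
  induction xs generalizing o1 o2 with
  | nil =>
    subst hrel
    rcases o1 with _ | m
    · rfl
    · simp only [List.foldl_nil]
      by_cases hm : m.1 < hi <;> simp [hm]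
  | cons x t ih =>
    simp only [List.foldl_cons]
    apply ih
    subst hrel
    rcases o1 with _ | m
    · by_cases hx : lo ≤ x.1
      · simp only [hx, if_true, pvMinStep]
        by_cases hxh : x.1 < hi <;> simp [hxh]
      · simp [hx]
    · by_cases hm : m.1 < hi
      · simp only [hm, if_true]
        by_cases hx : lo ≤ x.1
        · by_cases hxm : x.1 < m.1
          · have hxh : x.1 < hi := lt_trans hxm hm
            simp [hx, hxh, pvMinStep, hxm]
          · by_cases hxh : x.1 < hi <;>
              simp [hx, hxh, pvMinStep, hxm, hm]
        · simp [hx, hm]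
      · simp only [hm, if_false]
        by_cases hx : lo ≤ x.1
        · by_cases hxm : x.1 < m.1
          · simp only [hx, if_true, pvMinStep, hxm]
            by_cases hxh : x.1 < hi <;> simp [hxh]
          · have hxh : ¬ x.1 < hi := by omega
            simp [hx, hxh, pvMinStep, hxm, hm]
        · simp [hx, hm]

-- the min fold over the negated list is the negated max fold
theorem pvMin_neg (c : Int) (xs : List (Int × Int)) (o : Option (Int × Int)) :
    (xs.map (fun tv => (-tv.1, tv.2))).foldl
        (fun acc tv => if -c ≤ tv.1 then pvMinStep acc tv else acc)
        (o.map (fun m => (-m.1, m.2)))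
    = (xs.foldl (fun acc tv => if tv.1 ≤ c then pvMaxStep acc tv else acc) o).map
        (fun m => (-m.1, m.2)) := by
  induction xs generalizing o with
  | nil => rfl
  | cons x t ih =>
    simp only [List.map_cons, List.foldl_cons]
    rw [← ih]
    congr 1
    by_cases hx : x.1 ≤ c
    · have hx' : -c ≤ -x.1 := by omega
      rcases o with _ | m
      · simp [hx, hx', pvMinStep, pvMaxStep]
      · by_cases hmx : m.1 < x.1 <;>
          simp [hx, hx', pvMinStep, pvMaxStep, hmx]
    · have hx' : ¬ -c ≤ -x.1 := by omega
      simp [hx, hx']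

-- one-sided max fold, post-checked against lo, equals the two-sided max fold
theorem pvMax_one_sided (lo hi : Int) (xs : List (Int × Int)) (o1 o2 : Option (Int × Int))
    (hrel : o2 = match o1 with
      | none => none
      | some m => if lo < m.1 then some m else none) :
    (match xs.foldl (fun acc tv => if tv.1 ≤ hi then pvMaxStep acc tv else acc) o1 with
      | none => (-1 : Int)
      | some m => if lo < m.1 then m.2 else -1)
    = (match xs.foldl (fun acc tv => if lo < tv.1 ∧ tv.1 ≤ hi then pvMaxStep acc tv else acc) o2 with
      | none => (-1 : Int)
      | some m => m.2) := by
  induction xs generalizing o1 o2 with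
  | nil =>
    subst hrel
    rcases o1 with _ | m
    · rfl
    · simp only [List.foldl_nil]
      by_cases hm : lo < m.1 <;> simp [hm]
  | cons x t ih =>
    simp only [List.foldl_cons]
    apply ih
    subst hrel
    rcases o1 with _ | m
    · by_cases hx : x.1 ≤ hi
      · by_cases hxl : lo < x.1 <;> simp [pvMaxStep, hx, hxl]
      · simp [hx]
    · by_cases hm : lo < m.1
      · simp only [hm, if_true]
        by_cases hx : x.1 ≤ hi
        · by_cases hxm : m.1 < x.1
          · have hxl : lo < x.1 := lt_trans hm hxm
            simp [hx, hxl, pvMaxStep, hxm]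
          · by_cases hxl : lo < x.1 <;>
              simp [hx, hxl, pvMaxStep, hxm, hm]
        · simp [hx, hm]
      · simp only [hm, if_false]
        by_cases hx : x.1 ≤ hi
        · by_cases hxm : m.1 < x.1
          · simp only [hx, if_true, pvMaxStep, hxm]
            by_cases hxl : lo < x.1 <;> simp [hxl]
          · have hxl : ¬ lo < x.1 := by omega
            simp [hx, hxl, pvMaxStep, hxm, hm]
        · simp [hx, hm]

-- value of an option result with default second component -1
theorem pvOptGetD2 (o : Option (Int × Int)) (dt : Int) :
    (o.getD (dt, -1)).2 = match o with | none => (-1 : Int) | some m => m.2 := by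
  cases o <;> rfl

-- reading the negated-time result back in terms of the original times
theorem pvOptMapNeg (o : Option (Int × Int)) (a : Int) :
    (match o.map (fun m => (-m.1, m.2)) with
      | none => (-1 : Int)
      | some m => if m.1 < -a then m.2 else -1)
    = match o with
      | none => (-1 : Int)
      | some m => if a < m.1 then m.2 else -1 := by
  cases o with
  | none => rfl
  | some m =>
    simp only [Option.map_some]
    by_cases h : a < m.1
    · simp [h, show (-m.1 : Int) < -a by omega]
    · simp [h, show ¬ (-m.1 : Int) < -a by omega]

-- ===== VERDICT (by name: the statement is the Claim_ definition above) =====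
theorem vals_spec : Claim_equal_vals := by
  intro tv_arr a b _
  unfold Spec_vals vals vals_alt pvFirstInRange
  have hA := pvFoldA_eq a b tv_arr none none (by intro m hm; cases hm) (by intro m hm; cases hm)
  simp only [Option.getD_none] at hA
  rw [hA]
  rw [pvFirstLoop_eq_find, pvFirstLoop_eq_find, pvFind_sorted, pvFind_sorted]
  have hneg := pvMin_neg b tv_arr none
  simp only [Option.map_none] at hneg
  rw [hneg]
  have hmin := pvMin_one_sided a b tv_arr none none rfl
  have hmax := pvMax_one_sided a b tv_arr none none rfl
  rw [pvOptMapNeg]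
  simp only [pvOptGetD2]
  exact Prod.ext hmin.symm hmax.symm
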